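-- pv_equiv track=rewrite | github.com/nastyh/LeetCode | Basic Data Structures/Pluralize.py | pluralize_Nick
-- ===== SOURCE A (Python) =====
-- def pluralize_Nick(ll):
--     nlist, ndic = [], {}
--     for x in ll:
--         if x not in ndic:
--             count = 1
--             ndic[x] = count
--         else:
--             ndic[x] = ndic[x] + 1
--     for candidate in ndic:
--         if ndic[candidate] > 1:
--             nlist.append(candidate + 's')
--         else:
--             nlist.append(candidate)
--     return nlist
-- ===== SOURCE B (Python) =====
-- def pluralize_Nick(ll):
--     # Single pass, no counting: append each new item as-is and remember its slot;
--     # on a repeat occurrence, patch that slot to x + 's' (at most once).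
--     res, pos = [], {}
--     for x in ll:
--         if x in pos:
--             i = pos[x]
--             if res[i] == x:
--                 res[i] = x + 's'
--         else:
--             pos[x] = len(res)
--             res.append(x)
--     return res
-- ===== Notes on version B (the rewrite author's own statement) =====
-- stated objective: alternative
-- what changed: A builds a full count table in one pass and then walks the table appending suffixed names; B never counts: in a single pass it appends each first occurrence and records its output slot, then patches that slot in place to x+'s' when a second occurrence is seen.
import Mathlib
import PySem

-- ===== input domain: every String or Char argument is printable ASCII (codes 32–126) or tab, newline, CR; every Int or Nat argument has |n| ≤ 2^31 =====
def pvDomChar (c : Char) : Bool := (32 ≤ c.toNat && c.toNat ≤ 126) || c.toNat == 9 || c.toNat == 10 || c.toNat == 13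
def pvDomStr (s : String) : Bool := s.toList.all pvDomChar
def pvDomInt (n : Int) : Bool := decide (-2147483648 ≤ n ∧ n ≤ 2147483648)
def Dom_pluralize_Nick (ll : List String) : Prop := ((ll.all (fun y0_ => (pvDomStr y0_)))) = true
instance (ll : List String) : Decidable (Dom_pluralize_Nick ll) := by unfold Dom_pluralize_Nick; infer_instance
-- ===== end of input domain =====

-- B replaces A's count-table-then-walk by a single pass that appends each first
-- occurrence and patches that output slot in place to x+"s" on a repeat (no counts kept);
-- return values proved equal on the whole domain.


-- ===== PORT A =====
def pluralize_Nick (ll : List String) : List String :=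
  let ndic : PySem.Dict String Int :=
    ll.foldl (fun d x =>
      if d.contains x = false then d.insert x 1
      else d.insert x (d.getD x 0 + 1)) PySem.Dict.empty
  ndic.keys.foldl (fun nlist candidate =>
    if ndic.getD candidate 0 > 1 then nlist ++ [candidate ++ "s"]
    else nlist ++ [candidate]) []

-- ===== PORT B =====
-- one loop step of Source B; pos[x] is read with getD (key present: guarded by the contains
-- test) and res[i] with pyGetD/pySetD (i is always a stored index < len res, so the
-- total forms are exact here)
def pvStepB (st : List String × PySem.Dict String Int) (x : String) :
    List String × PySem.Dict String Int :=
  if st.2.contains x then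
    if PySem.List.pyGetD st.1 (st.2.getD x 0) "" == x
    then (PySem.List.pySetD st.1 (st.2.getD x 0) (x ++ "s"), st.2)
    else st
  else (st.1 ++ [x], st.2.insert x (st.1.length : Int))

def pluralize_Nick_alt (ll : List String) : List String :=
  (ll.foldl pvStepB ([], PySem.Dict.empty)).1

-- ===== PRECONDITION & SPEC =====
def Spec_pluralize_Nick (ll : List String) (out : List String) : Prop := out = pluralize_Nick_alt ll
instance (ll : List String) (out : List String) : Decidable (Spec_pluralize_Nick ll out) := by unfold Spec_pluralize_Nick; infer_instance

-- ===== CLAIM (what is proved, stated in full; the proofs are below) =====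
def Claim_equal_pluralize_Nick : Prop := ∀ (ll : List String), Dom_pluralize_Nick ll → Spec_pluralize_Nick ll (pluralize_Nick ll)

-- ===== LEMMAS AND PROOFS =====

-- the common value both programs produce for one distinct item of ll
def pvG (p : List String) (k : String) : String :=
  if 1 < p.count k then k ++ "s" else k

theorem pvA_eq (ll : List String) :
    pluralize_Nick ll = (PySem.Set.ofList ll).map (pvG ll) := by
  have hstep : (fun (d : PySem.Dict String Int) x =>
      if d.contains x = false then d.insert x 1
      else d.insert x (d.getD x 0 + 1)) =
      fun d x => d.insert x (d.getD x 0 + 1) := by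
    funext d x
    by_cases h : d.contains x = false
    · rw [if_pos h, PySem.Dict.getD_of_not_contains d 0 h]
      norm_num
    · rw [if_neg h]
  simp only [pluralize_Nick, hstep, PySem.Dict.foldl_insert_getD_add_one_eq_counter,
    PySem.Dict.keys_counter]
  rw [PySem.List.foldl_congr_mem' (PySem.Set.ofList ll) _
      (fun nlist k => nlist ++ [pvG ll k]) []
      (by
        intro k _ acc
        rw [PySem.Dict.getD_counter]
        by_cases hc : 1 < ll.count k
        · rw [if_pos (by omega : ((ll.count k : Int)) > 1)]
          simp [pvG, hc]
        · rw [if_neg (by omega : ¬ ((ll.count k : Int)) > 1)]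
          simp [pvG, hc]),
    PySem.List.foldl_append_singleton_eq_map]
  simp

theorem pv_append_s_ne (x : String) : ¬ (x ++ "s" = x) := by
  intro h
  have h2 := congrArg (fun s => s.toList.length) h
  simp at h2

theorem pv_ofList_append_singleton (p : List String) (x : String) :
    PySem.Set.ofList (p ++ [x]) = PySem.Set.add (PySem.Set.ofList p) x := by
  simp [PySem.Set.ofList_eq_foldl, List.foldl_append]

-- patching the slot of x in a mapped nodup list = mapping a pointwise-updated function
theorem pvMap_set (S : List String) (hnd : S.Nodup) (x : String) (hx : x ∈ S)
    (f g : String → String) (w : String) (hgx : g x = w)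
    (hag : ∀ k ∈ S, k ≠ x → f k = g k) :
    (S.map f).set (S.idxOf x) w = S.map g := by
  have hi : S.idxOf x < S.length := List.idxOf_lt_length_of_mem hx
  apply List.ext_getElem
  · simp
  · intro j hj1 hj2
    have hj : j < S.length := by simpa using hj2
    rw [List.getElem_set]
    by_cases hji : S.idxOf x = j
    · subst hji
      rw [if_pos rfl]
      have hxx : S[S.idxOf x] = x := List.getElem_idxOf hi
      simp [List.getElem_map, hxx, hgx]
    · rw [if_neg hji]
      simp only [List.getElem_map]
      have hne : S[j] ≠ x := by
        intro hEq
        apply hji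
        have hx' : S[S.idxOf x]'hi = x := List.getElem_idxOf hi
        exact (hnd.getElem_inj_iff).mp (hx'.trans hEq.symm)
      exact hag _ (List.getElem_mem _) hne

-- the loop invariant of B: after a prefix p, res is the answer for p and pos maps each
-- distinct element of p to its first-occurrence index
theorem pvB_inv (p : List String) :
    ∃ d : PySem.Dict String Int,
      p.foldl pvStepB ([], PySem.Dict.empty) = ((PySem.Set.ofList p).map (pvG p), d)
      ∧ (∀ k : String, d.contains k = true ↔ k ∈ PySem.Set.ofList p)
      ∧ (∀ k : String, k ∈ PySem.Set.ofList p →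
          d.getD k 0 = (((PySem.Set.ofList p).idxOf k : Nat) : Int)) := by
  induction p using List.reverseRecOn with
  | nil =>
      refine ⟨PySem.Dict.empty, ?_, ?_, ?_⟩
      · simp [PySem.Set.ofList_eq_foldl]
      · intro k; simp [PySem.Dict.contains_empty, PySem.Set.ofList_eq_foldl]
      · intro k hk; simp [PySem.Set.ofList_eq_foldl] at hk
  | append_singleton p x ih =>
      obtain ⟨d, hfold, hcont, hget⟩ := ih
      rw [List.foldl_append, hfold]
      simp only [List.foldl_cons, List.foldl_nil]
      by_cases hx : x ∈ PySem.Set.ofList p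
      · -- repeat occurrence: the set of distinct items is unchanged
        have hofl : PySem.Set.ofList (p ++ [x]) = PySem.Set.ofList p := by
          rw [pv_ofList_append_singleton]
          simp [PySem.Set.add, PySem.Set.contains, hx]
        have hxp : x ∈ p := (PySem.Set.mem_ofList p x).mp hx
        have hcnt1 : 1 ≤ p.count x := List.one_le_count_iff.mpr hxp
        have hcntx : (p ++ [x]).count x = p.count x + 1 := by
          simp [List.count_append]
        have hcnto : ∀ k, k ≠ x → (p ++ [x]).count k = p.count k := by
          intro k hk
          have hxk : x ≠ k := Ne.symm hk
          simp [List.count_append, hxk]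
        have hgo : ∀ k ∈ PySem.Set.ofList p, k ≠ x → pvG p k = pvG (p ++ [x]) k := by
          intro k _ hk; unfold pvG; rw [hcnto k hk]
        have hi : (PySem.Set.ofList p).idxOf x < (PySem.Set.ofList p).length :=
          List.idxOf_lt_length_of_mem hx
        have hstep1 : (pvStepB ((PySem.Set.ofList p).map (pvG p), d) x) =
            if pvG p x = x
            then (PySem.List.pySetD ((PySem.Set.ofList p).map (pvG p))
                    (((PySem.Set.ofList p).idxOf x : Nat) : Int) (x ++ "s"), d)
            else ((PySem.Set.ofList p).map (pvG p), d) := by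
          simp only [pvStepB]
          rw [if_pos ((hcont x).mpr hx), hget x hx, PySem.List.pyGetD_natCast,
            List.getD_eq_getElem _ _ (by simpa using hi)]
          have hval : ((PySem.Set.ofList p).map (pvG p))[(PySem.Set.ofList p).idxOf x]'(by simpa using hi)
              = pvG p x := by
            simp [List.getElem_map, List.getElem_idxOf hi]
          rw [hval]
          by_cases hgp : pvG p x = x
          · simp [hgp]
          · simp [hgp]
        by_cases hc : 1 < p.count x
        · -- already plural: res[i] = x + 's' ≠ x, nothing changes
          have hgpx : pvG p x = x ++ "s" := by unfold pvG; rw [if_pos hc]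
          rw [hstep1, if_neg (by rw [hgpx]; exact pv_append_s_ne x)]
          refine ⟨d, ?_, ?_, ?_⟩
          · rw [hofl]
            have hmap : (PySem.Set.ofList p).map (pvG p)
                = (PySem.Set.ofList p).map (pvG (p ++ [x])) := by
              apply List.map_congr_left
              intro k hk
              by_cases hkx : k = x
              · subst hkx
                unfold pvG
                rw [hcntx, if_pos hc, if_pos (by omega)]
              · exact hgo k hk hkx
            rw [← hmap]
          · intro k; rw [hofl]; exact hcont k
          · intro k hk; rw [hofl] at hk ⊢; exact hget k hk
        · -- second occurrence: patch the slot to x + 's'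
          have hgpx : pvG p x = x := by unfold pvG; rw [if_neg hc]
          rw [hstep1, if_pos hgpx, PySem.List.pySetD_natCast]
          refine ⟨d, ?_, ?_, ?_⟩
          · rw [hofl]
            have hmap := pvMap_set (PySem.Set.ofList p) (PySem.Set.nodup_ofList p) x hx
              (pvG p) (pvG (p ++ [x])) (x ++ "s")
              (by unfold pvG; rw [hcntx, if_pos (by omega)]) hgo
            rw [hmap]
          · intro k; rw [hofl]; exact hcont k
          · intro k hk; rw [hofl] at hk ⊢; exact hget k hk
      · -- first occurrence: append x and record its slot
        have hxp : x ∉ p := fun h => hx ((PySem.Set.mem_ofList p x).mpr h)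
        have hofl : PySem.Set.ofList (p ++ [x]) = PySem.Set.ofList p ++ [x] := by
          rw [pv_ofList_append_singleton]
          simp [PySem.Set.add, PySem.Set.contains, hx]
        have hcnt0 : p.count x = 0 := List.count_eq_zero.mpr hxp
        have hcnto : ∀ k, k ≠ x → (p ++ [x]).count k = p.count k := by
          intro k hk
          have hxk : x ≠ k := Ne.symm hk
          simp [List.count_append, hxk]
        have hstep1 : (pvStepB ((PySem.Set.ofList p).map (pvG p), d) x) =
            ((PySem.Set.ofList p).map (pvG p) ++ [x],
              d.insert x (((PySem.Set.ofList p).map (pvG p)).length : Int)) := by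
          simp only [pvStepB]
          rw [if_neg (by rw [hcont x]; exact hx)]
        rw [hstep1]
        refine ⟨d.insert x (((PySem.Set.ofList p).map (pvG p)).length : Int), ?_, ?_, ?_⟩
        · rw [hofl, List.map_append]
          have h1 : List.map (pvG (p ++ [x])) (PySem.Set.ofList p)
              = List.map (pvG p) (PySem.Set.ofList p) := by
            apply List.map_congr_left
            intro k hk
            have hkx : k ≠ x := fun h => hx (h ▸ hk)
            unfold pvG; rw [hcnto k hkx]
          have h2 : List.map (pvG (p ++ [x])) [x] = [x] := by
            simp [pvG, List.count_append, hcnt0]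
          rw [h1, h2]
        · intro k
          rw [hofl, PySem.Dict.contains_insert]
          simp only [Bool.or_eq_true, beq_iff_eq, List.mem_append, List.mem_singleton]
          rw [hcont k]
          tauto
        · intro k hk
          rw [hofl] at hk ⊢
          by_cases hkx : k = x
          · subst hkx
            rw [PySem.Dict.getD_insert, if_pos rfl, List.idxOf_append, if_neg hx]
            simp [List.idxOf_cons_self]
          · have hkS : k ∈ PySem.Set.ofList p := by
              rcases List.mem_append.mp hk with h | h
              · exact h
              · simp only [List.mem_singleton] at h; exact absurd h hkx
            rw [PySem.Dict.getD_insert, if_neg hkx, List.idxOf_append, if_pos hkS]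
            exact hget k hkS

theorem pvB_eq (ll : List String) :
    pluralize_Nick_alt ll = (PySem.Set.ofList ll).map (pvG ll) := by
  obtain ⟨d, hfold, -, -⟩ := pvB_inv ll
  simp [pluralize_Nick_alt, hfold]

-- ===== VERDICT (by name: the statement is the Claim_ definition above) =====
theorem pluralize_Nick_spec : Claim_equal_pluralize_Nick := by
  intro ll _
  show pluralize_Nick ll = pluralize_Nick_alt ll
  rw [pvA_eq, pvB_eq]
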